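-- pv_equiv track=rewrite | github.com/slostett/Code-Samples-MIT | lab5/SAT Solver.py | bool_works
-- ===== SOURCE A (Python) =====
-- def bool_works(formula, var, bool):
--     '''
--     :param formula: formula in traditional notation
--     :param var:  string variable id
--     :param bool: bool to check viability
--     :return: True if variable with this bool returns valid solution, else False
--     '''
--     for clause in formula:
--         for literal in clause:
--             if literal[0] == var:
--                 if literal[1] == bool:
--                     break
--                 elif len(clause) == 1:
--                     return False
--     return True
-- ===== SOURCE B (Python) =====
-- def bool_works(formula, var, bool):
--     # Single pass over clauses: only a unit clause whose lone literal is
--     # (var, not bool) can force False; no per-literal inner loop.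
--     return all(not (len(clause) == 1 and clause[0][0] == var and clause[0][1] != bool)
--                for clause in formula)
-- ===== Notes on version B (the rewrite author's own statement) =====
-- stated objective: simpler
-- what changed: B drops A's inner per-literal scan: only unit clauses can force False, so B is a single all(...) pass over clauses inspecting just clause[0] of length-1 clauses.
import Mathlib
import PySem

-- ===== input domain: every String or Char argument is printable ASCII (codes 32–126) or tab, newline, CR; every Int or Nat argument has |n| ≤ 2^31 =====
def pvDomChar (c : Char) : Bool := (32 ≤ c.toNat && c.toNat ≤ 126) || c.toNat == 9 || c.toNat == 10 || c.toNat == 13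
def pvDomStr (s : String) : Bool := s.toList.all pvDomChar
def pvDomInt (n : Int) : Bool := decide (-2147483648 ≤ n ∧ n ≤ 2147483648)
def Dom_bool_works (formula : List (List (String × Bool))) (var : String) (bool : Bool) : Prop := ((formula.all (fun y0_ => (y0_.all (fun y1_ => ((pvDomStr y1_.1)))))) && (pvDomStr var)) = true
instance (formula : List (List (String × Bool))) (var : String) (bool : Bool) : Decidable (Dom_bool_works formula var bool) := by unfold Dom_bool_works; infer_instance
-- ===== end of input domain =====

-- B replaces A's nested per-literal scan with a single pass over clauses that inspects only the first literal of unit clauses (simpler, same result).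


-- ===== PORT A =====
-- inner loop of A over the literals of `clause`; `full` is the whole clause
-- (for the len(clause)==1 test). Returns false when A's `return False` fires,
-- true when the inner loop breaks or finishes.
def scanClauseA (lits full : List (String × Bool)) (var : String) (bool : Bool) : Bool :=
  match lits with
  | [] => true
  | l :: rest =>
    if l.1 == var then
      if l.2 == bool then true        -- break
      else if full.length == 1 then false   -- return False
      else scanClauseA rest full var bool
    else scanClauseA rest full var bool

def bool_works (formula : List (List (String × Bool))) (var : String) (bool : Bool) : Bool :=
  match formula with
  | [] => true
  | c :: rest => if scanClauseA c c var bool then bool_works rest var bool else false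

-- ===== PORT B =====
def bool_works_alt (formula : List (List (String × Bool))) (var : String) (bool : Bool) : Bool :=
  formula.all (fun clause =>
    !(clause.length == 1 &&
      (match clause with
       | l :: _ => l.1 == var && l.2 != bool
       | [] => false)))

-- ===== PRECONDITION & SPEC =====
def Spec_bool_works (formula : List (List (String × Bool))) (var : String) (bool : Bool) (out : Bool) : Prop := out = bool_works_alt formula var bool
instance (formula : List (List (String × Bool))) (var : String) (bool : Bool) (out : Bool) : Decidable (Spec_bool_works formula var bool out) := by unfold Spec_bool_works; infer_instance

-- ===== CLAIM (what is proved, stated in full; the proofs are below) =====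
def Claim_equal_bool_works : Prop := ∀ (formula : List (List (String × Bool))) (var : String) (bool : Bool), Dom_bool_works formula var bool → Spec_bool_works formula var bool (bool_works formula var bool)

-- ===== LEMMAS AND PROOFS =====

-- a clause of length ≠ 1 never makes A return False
theorem scanClauseA_non_unit (lits full : List (String × Bool)) (var : String) (bool : Bool)
    (h : full.length ≠ 1) : scanClauseA lits full var bool = true := by
  induction lits with
  | nil => rfl
  | cons l rest ih =>
    simp only [scanClauseA]
    split_ifs with h1 h2 h3
    · rfl
    · exact absurd (by simpa using h3) h
    · exact ih
    · exact ih

-- A's inner scan of a clause agrees with B's per-clause unit-clause test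
theorem scanClauseA_eq (c : List (String × Bool)) (var : String) (bool : Bool) :
    scanClauseA c c var bool =
      (!(c.length == 1 &&
        (match c with
         | l :: _ => l.1 == var && l.2 != bool
         | [] => false))) := by
  match c with
  | [] => rfl
  | [l] =>
    simp only [scanClauseA]
    split_ifs with h1 h2 <;> simp_all
  | l :: l2 :: rest =>
    have h : (l :: l2 :: rest).length ≠ 1 := by simp
    rw [scanClauseA_non_unit _ _ _ _ h]
    simp

theorem bool_works_eq_alt (formula : List (List (String × Bool))) (var : String) (bool : Bool) :
    bool_works formula var bool = bool_works_alt formula var bool := by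
  induction formula with
  | nil => rfl
  | cons c rest ih =>
    simp only [bool_works, bool_works_alt, List.all_cons, scanClauseA_eq]
    rw [bool_works_alt] at ih
    split_ifs with h <;> simp_all

-- ===== VERDICT (by name: the statement is the Claim_ definition above) =====
theorem bool_works_spec : Claim_equal_bool_works := by
  intro formula var bool _
  unfold Spec_bool_works
  exact bool_works_eq_alt formula var bool
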